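-- pv_equiv track=rewrite | github.com/seonjuuu/blockchain_fintech | Walletgen.py | base58_to_dec
-- ===== SOURCE A (Python) =====
-- def base58_to_dec(n):
--     b58="123456789ABCDEFGHJKLMNPQRSTUVWXYZabcdefghijkmnopqrstuvwxyz"
--     tmp = n
--     tmp = tmp[::-1]
--     exp =0
--     ret =0
--     for i in tmp:
--         idx = b58.find(i)
--         ret = ret + idx*(58**exp)
--         exp=exp+1
--     return ret
-- ===== SOURCE B (Python) =====
-- def base58_to_dec(n):
--     b58 = "123456789ABCDEFGHJKLMNPQRSTUVWXYZabcdefghijkmnopqrstuvwxyz"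
--     ret = 0
--     for i in n:
--         ret = ret * 58 + b58.find(i)
--     return ret
-- ===== Notes on version B (the rewrite author's own statement) =====
-- stated objective: faster
-- what changed: Replaces the reverse-the-string loop with repeated exponentiation 58**exp by a single forward Horner pass ret = ret*58 + idx.
import Mathlib
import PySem

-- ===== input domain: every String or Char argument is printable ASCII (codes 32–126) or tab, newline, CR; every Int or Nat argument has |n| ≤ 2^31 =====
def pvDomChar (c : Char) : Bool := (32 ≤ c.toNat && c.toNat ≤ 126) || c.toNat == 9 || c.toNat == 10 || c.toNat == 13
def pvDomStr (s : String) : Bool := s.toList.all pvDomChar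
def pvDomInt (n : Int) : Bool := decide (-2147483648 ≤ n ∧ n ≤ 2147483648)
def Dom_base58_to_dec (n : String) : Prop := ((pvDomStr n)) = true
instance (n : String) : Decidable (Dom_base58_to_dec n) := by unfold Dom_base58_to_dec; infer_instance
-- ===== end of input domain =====

-- B replaces A's reversed loop with repeated exponentiation by a single forward Horner pass (same return value).

-- the base58 alphabet both Pythons spell out
def pvB58 : List Char := "123456789ABCDEFGHJKLMNPQRSTUVWXYZabcdefghijkmnopqrstuvwxyz".toList

-- ===== PORT A =====
-- tmp[::-1] is reverse (PySem.Chars.slice?_none_none_neg_one); b58.find(i) is PySem.Chars.find b58 [i].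
def base58_to_dec (n : String) : Int :=
  let tmp := n.toList.reverse
  let s := tmp.foldl (fun (s : Nat × Int) i =>
      let idx := PySem.Chars.find pvB58 [i]
      (s.1 + 1, s.2 + idx * 58 ^ s.1)) (0, 0)
  s.2

-- ===== PORT B =====
def base58_to_dec_alt (n : String) : Int :=
  n.toList.foldl (fun ret i => ret * 58 + PySem.Chars.find pvB58 [i]) 0

-- ===== PRECONDITION & SPEC =====
def Spec_base58_to_dec (n : String) (out : Int) : Prop := out = base58_to_dec_alt n
instance (n : String) (out : Int) : Decidable (Spec_base58_to_dec n out) := by unfold Spec_base58_to_dec; infer_instance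

-- ===== CLAIM (what is proved, stated in full; the proofs are below) =====
def Claim_equal_base58_to_dec : Prop := ∀ (n : String), Dom_base58_to_dec n → Spec_base58_to_dec n (base58_to_dec n)

-- ===== LEMMAS AND PROOFS =====

-- Horner's accumulator distributes: folding from a equals a·58^len plus folding from 0.
theorem pvHornerAcc (l : List Char) (a : Int) :
    l.foldl (fun ret i => ret * 58 + PySem.Chars.find pvB58 [i]) a
      = a * 58 ^ l.length + l.foldl (fun ret i => ret * 58 + PySem.Chars.find pvB58 [i]) 0 := by
  induction l generalizing a with
  | nil => simp
  | cons c l ih =>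
    simp only [List.foldl_cons, List.length_cons]
    rw [ih (a * 58 + PySem.Chars.find pvB58 [c]), ih (0 * 58 + PySem.Chars.find pvB58 [c])]
    ring

-- A's reversed positional loop, started at (e, r), computes r + 58^e · (Horner of the unreversed list).
theorem pvRevFold (l : List Char) (e : Nat) (r : Int) :
    l.reverse.foldl (fun (s : Nat × Int) i =>
        (s.1 + 1, s.2 + PySem.Chars.find pvB58 [i] * 58 ^ s.1)) (e, r)
      = (e + l.length,
         r + 58 ^ e * l.foldl (fun ret i => ret * 58 + PySem.Chars.find pvB58 [i]) 0) := by
  induction l generalizing e r with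
  | nil => simp
  | cons c l ih =>
    simp only [List.reverse_cons, List.foldl_append, List.foldl_cons, List.foldl_nil,
      List.length_cons, ih]
    rw [pvHornerAcc l (0 * 58 + PySem.Chars.find pvB58 [c])]
    refine Prod.ext ?_ ?_
    · omega
    · simp only []
      ring

-- ===== VERDICT (by name: the statement is the Claim_ definition above) =====
theorem base58_to_dec_spec : Claim_equal_base58_to_dec := by
  intro n _
  show base58_to_dec n = base58_to_dec_alt n
  unfold base58_to_dec base58_to_dec_alt
  simp only [pvRevFold n.toList 0 0]
  ring
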